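-- pv_equiv track=rewrite | github.com/aorursy/KT_dataset_py | hebertalbertin_pgs1m1-aula-4-tarefa-1.py | f
-- ===== SOURCE A (Python) =====
-- def f(i):
--     if i == 1:
--         i = 2
--     elif i == 2:
--         i = 1
--     else:
--         i = 2*f(i-1) + g(i-2)
--     return i
--
-- def g(i):
--     if i >= 3:
--         i = g(i-1) + 3*f(i-2)
--     return i
-- ===== SOURCE B (Python) =====
-- def f(i):
--     if i == 1:
--         return 2
--     if i == 2:
--         return 1
--     f2, f1 = 2, 1
--     g2, g1 = 1, 2
--     for _ in range(3, i + 1):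
--         f2, f1, g2, g1 = f1, 2 * f1 + g2, g1, g1 + 3 * f2
--     return f1
-- ===== Notes on version B (the rewrite author's own statement) =====
-- stated objective: faster
-- what changed: replaced the exponential mutual recursion on f and g by a single bottom-up loop carrying the last two values of each sequence; intended as asymptotically faster (measured: A already times out at n=16 where B still returns, so no clean ratio could be read)
import Mathlib
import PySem

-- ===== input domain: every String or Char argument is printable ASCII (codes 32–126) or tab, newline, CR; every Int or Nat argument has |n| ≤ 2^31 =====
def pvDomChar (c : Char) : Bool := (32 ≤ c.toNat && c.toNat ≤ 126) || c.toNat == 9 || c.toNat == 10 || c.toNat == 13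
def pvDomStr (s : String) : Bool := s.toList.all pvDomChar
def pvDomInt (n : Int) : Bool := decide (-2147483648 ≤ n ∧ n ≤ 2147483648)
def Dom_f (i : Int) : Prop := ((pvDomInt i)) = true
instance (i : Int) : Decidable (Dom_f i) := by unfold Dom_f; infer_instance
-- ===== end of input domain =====

-- B replaces A's exponential mutual recursion by one bottom-up loop; intended as asymptotically
-- faster (a timing run saw A time out at n=16 where B returned; no ratio could be measured).

-- ===== PORT A =====
-- A's mutual recursion f/g, transliterated with a fuel counter (i.toNat suffices on
-- Pre_f, proved below; with fuel exhausted — only reachable when Python would recurse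
-- forever — the port returns 0).
mutual
def fAuxA : Nat → Int → Int
  | 0, _ => 0
  | k+1, i => if i = 1 then 2 else if i = 2 then 1 else 2 * fAuxA k (i-1) + gAuxA k (i-2)
def gAuxA : Nat → Int → Int
  | 0, i => i
  | k+1, i => if i ≥ 3 then gAuxA k (i-1) + 3 * fAuxA k (i-2) else i
end

def f (i : Int) : Int := fAuxA i.toNat i

-- ===== PORT B =====
-- state (f2, f1, g2, g1) = (f(j-2), f(j-1), g(j-2), g(j-1)), updated once per loop turn
def f_alt (i : Int) : Int :=
  if i = 1 then 2
  else if i = 2 then 1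
  else
    ((PySem.List.pyRange 3 (i+1) 1).foldl
      (fun (s : Int × Int × Int × Int) _ =>
        (s.2.1, 2 * s.2.1 + s.2.2.1, s.2.2.2, s.2.2.2 + 3 * s.1))
      (2, 1, 1, 2)).2.1

-- ===== PRECONDITION & SPEC =====
-- Python A recurses forever (RecursionError) for i ≤ 0, so those inputs are excluded.
def Pre_f (i : Int) : Prop := 1 ≤ i
instance (i : Int) : Decidable (Pre_f i) := by unfold Pre_f; infer_instance
def pvWitness_f : Int := (4)

def Spec_f (i : Int) (out : Int) : Prop := out = f_alt i
instance (i : Int) (out : Int) : Decidable (Spec_f i out) := by unfold Spec_f; infer_instance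

-- ===== CLAIM (what is proved, stated in full; the proofs are below) =====
def Claim_equal_f : Prop := ∀ (i : Int), Dom_f i → Pre_f i → Spec_f i (f i)

-- ===== LEMMAS AND PROOFS =====

-- the mathematical sequences f and g, indexed by Nat
mutual
def Fm : Nat → Int
  | 0 => 0
  | 1 => 2
  | 2 => 1
  | (m+3) => 2 * Fm (m+2) + Gm (m+1)
def Gm : Nat → Int
  | 0 => 0
  | 1 => 1
  | 2 => 2
  | (m+3) => Gm (m+2) + 3 * Fm (m+1)
end

-- A-side: with enough fuel, fAuxA/gAuxA compute Fm/Gm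
theorem auxA_eq (k : Nat) :
    (∀ n : Nat, 1 ≤ n → n ≤ k → fAuxA k (n : Int) = Fm n) ∧
    (∀ n : Nat, n ≤ k + 1 → gAuxA k (n : Int) = Gm n) := by
  induction k with
  | zero =>
    refine ⟨fun n h1 h2 => absurd (h1.trans h2) (by decide), fun n hn => ?_⟩
    interval_cases n <;> simp [gAuxA, Gm]
  | succ k ih =>
    obtain ⟨ihf, ihg⟩ := ih
    constructor
    · intro n h1 h2
      match n, h1 with
      | 1, _ => simp [fAuxA, Fm]
      | 2, _ => simp [fAuxA, Fm]
      | (m+3), _ =>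
        have e1 : ((m : Int) + 3) - 1 = ((m + 2 : Nat) : Int) := by push_cast; ring
        have e2 : ((m : Int) + 3) - 2 = ((m + 1 : Nat) : Int) := by push_cast; ring
        have hf := ihf (m+2) (by omega) (by omega)
        have hg := ihg (m+1) (by omega)
        simp only [fAuxA]
        rw [if_neg (by push_cast; omega), if_neg (by push_cast; omega)]
        push_cast
        rw [e1, e2, hf, hg]
        simp [Fm]
    · intro n hn
      match n with
      | 0 => simp [gAuxA, Gm]
      | 1 => simp [gAuxA, Gm]
      | 2 => simp [gAuxA, Gm]
      | (m+3) =>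
        have e1 : ((m : Int) + 3) - 1 = ((m + 2 : Nat) : Int) := by push_cast; ring
        have e2 : ((m : Int) + 3) - 2 = ((m + 1 : Nat) : Int) := by push_cast; ring
        have hg := ihg (m+2) (by omega)
        have hf := ihf (m+1) (by omega) (by omega)
        simp only [gAuxA]
        rw [if_pos (by push_cast; omega)]
        push_cast
        rw [e1, e2, hg, hf]
        simp [Gm]

theorem f_eq_Fm (i : Int) (h : 1 ≤ i) : f i = Fm i.toNat := by
  have hcast : (i.toNat : Int) = i := Int.toNat_of_nonneg (by omega)
  have := (auxA_eq i.toNat).1 i.toNat (by omega) le_rfl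
  unfold f
  rw [← hcast]
  exact this

-- B-side: the loop body ignores the range element, so the fold is an iterate
def stepB (s : Int × Int × Int × Int) : Int × Int × Int × Int :=
  (s.2.1, 2 * s.2.1 + s.2.2.1, s.2.2.2, s.2.2.2 + 3 * s.1)

theorem foldl_const_iterate (l : List Int) (init : Int × Int × Int × Int) :
    l.foldl (fun s _ => stepB s) init = stepB^[l.length] init := by
  induction l generalizing init with
  | nil => rfl
  | cons x xs ih => simp [List.foldl_cons, ih, Function.iterate_succ_apply]

theorem iterate_stepB (m : Nat) :
    stepB^[m] (2, 1, 1, 2) = (Fm (m+1), Fm (m+2), Gm (m+1), Gm (m+2)) := by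
  induction m with
  | zero => simp [Fm, Gm]
  | succ m ih =>
    rw [Function.iterate_succ_apply', ih]
    show (Fm (m+2), 2 * Fm (m+2) + Gm (m+1), Gm (m+2), Gm (m+2) + 3 * Fm (m+1)) = _
    have hf : Fm (m+3) = 2 * Fm (m+2) + Gm (m+1) := by simp [Fm]
    have hg : Gm (m+3) = Gm (m+2) + 3 * Fm (m+1) := by simp [Gm]
    rw [hf, hg]

theorem f_alt_eq_Fm (i : Int) (h : 1 ≤ i) : f_alt i = Fm i.toNat := by
  unfold f_alt
  rcases eq_or_ne i 1 with rfl | h1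
  · simp [Fm]
  rcases eq_or_ne i 2 with rfl | h2
  · simp [Fm]
  have h3 : 3 ≤ i := by omega
  rw [if_neg h1, if_neg h2]
  have : (PySem.List.pyRange 3 (i+1) 1).foldl
      (fun (s : Int × Int × Int × Int) _ =>
        (s.2.1, 2 * s.2.1 + s.2.2.1, s.2.2.2, s.2.2.2 + 3 * s.1))
      (2, 1, 1, 2) = stepB^[(PySem.List.pyRange 3 (i+1) 1).length] (2, 1, 1, 2) :=
    foldl_const_iterate _ _
  rw [this, PySem.List.length_pyRange_one, iterate_stepB]
  have : (i + 1 - 3).toNat + 2 = i.toNat := by omega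
  simp [this]

-- ===== VERDICT (by name: the statement is the Claim_ definition above) =====
theorem f_spec : Claim_equal_f := by
  intro i _ hpre
  unfold Spec_f
  rw [f_eq_Fm i hpre, f_alt_eq_Fm i hpre]
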